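-- pv_equiv track=rewrite | github.com/eliottcassidy2000/math | 04-computation/gs_n7_typed.py | conflict_graph_adj
-- ===== SOURCE A (Python) =====
-- def conflict_graph_adj(cycles):
--     nc = len(cycles)
--     adj = [[False]*nc for _ in range(nc)]
--     for i in range(nc):
--         for j in range(i+1, nc):
--             if set(cycles[i][0]) & set(cycles[j][0]):
--                 adj[i][j] = adj[j][i] = True
--     return adj
-- ===== SOURCE B (Python) =====
-- def conflict_graph_adj(cycles):
--     nc = len(cycles)
--     index = {}
--     for i, c in enumerate(cycles):
--         for v in set(c[0]):
--             index.setdefault(v, []).append(i)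
--     adj = [[False] * nc for _ in range(nc)]
--     for group in index.values():
--         for a in group:
--             for b in group:
--                 if a != b:
--                     adj[a][b] = True
--     return adj
-- ===== Notes on version B (the rewrite author's own statement) =====
-- stated objective: faster
-- what changed: B replaces A's all-pairs set-intersection test by an inverted index: one pass groups cycle indices by vertex, then every pair inside each vertex group is marked, so no pair of cycles is ever intersected.
-- outside the precondition, e.g. on conflict_graph_adj([[]]): A returns [[False]], B raises IndexError
import Mathlib
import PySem

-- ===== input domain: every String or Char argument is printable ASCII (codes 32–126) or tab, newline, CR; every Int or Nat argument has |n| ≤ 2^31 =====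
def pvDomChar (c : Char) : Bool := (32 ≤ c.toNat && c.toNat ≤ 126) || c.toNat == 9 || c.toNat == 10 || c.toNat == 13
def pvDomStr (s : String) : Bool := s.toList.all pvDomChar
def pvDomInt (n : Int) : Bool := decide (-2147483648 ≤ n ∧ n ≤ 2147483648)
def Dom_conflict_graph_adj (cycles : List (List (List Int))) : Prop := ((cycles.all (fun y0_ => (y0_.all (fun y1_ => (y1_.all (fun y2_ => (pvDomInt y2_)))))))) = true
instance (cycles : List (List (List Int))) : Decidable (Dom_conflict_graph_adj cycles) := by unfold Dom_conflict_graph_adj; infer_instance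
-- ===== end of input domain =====

-- B builds an inverted index vertex -> cycle indices and marks every pair inside each
-- vertex group, instead of A's pairwise set-intersection fill; objective: faster (measured).

-- ===== PORT A =====
def conflict_graph_adj (cycles : List (List (List Int))) : List (List Bool) :=
  let nc : Int := PySem.List.len cycles
  let adj : List (List Bool) := (PySem.List.pyRange 0 nc 1).map (fun _ => List.replicate nc.toNat false)
  (PySem.List.pyRange 0 nc 1).foldl (fun adj i =>
    (PySem.List.pyRange (i+1) nc 1).foldl (fun adj j =>
      if PySem.Set.inter (PySem.Set.ofList (PySem.List.pyGetD (PySem.List.pyGetD cycles i []) 0 []))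
          (PySem.Set.ofList (PySem.List.pyGetD (PySem.List.pyGetD cycles j []) 0 [])) ≠ [] then
        let adj1 := PySem.List.pySetD adj i (PySem.List.pySetD (PySem.List.pyGetD adj i []) j true)
        PySem.List.pySetD adj1 j (PySem.List.pySetD (PySem.List.pyGetD adj1 j []) i true)
      else adj) adj) adj

-- ===== PORT B =====
def conflict_graph_adj_alt (cycles : List (List (List Int))) : List (List Bool) :=
  let nc : Int := PySem.List.len cycles
  -- index.setdefault(v, []).append(i)  ==  modify v [] (· ++ [i])
  let index : PySem.Dict Int (List Int) :=
    (PySem.List.enumerate cycles).foldl (fun d ic =>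
      (PySem.Set.ofList (PySem.List.pyGetD ic.2 0 [])).foldl (fun d v =>
        PySem.Dict.modify d v [] (fun g => g ++ [ic.1])) d) PySem.Dict.empty
  let adj : List (List Bool) := (PySem.List.pyRange 0 nc 1).map (fun _ => List.replicate nc.toNat false)
  (PySem.Dict.values index).foldl (fun adj group =>
    group.foldl (fun adj a =>
      group.foldl (fun adj b =>
        if a ≠ b then
          PySem.List.pySetD adj a (PySem.List.pySetD (PySem.List.pyGetD adj a []) b true)
        else adj) adj) adj) adj

-- ===== PRECONDITION & SPEC =====
-- Pre_ excludes inputs containing an empty cycle: there B (which reads every c[0] up front)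
-- raises IndexError, while A raises too except in the degenerate single-cycle case (nc < 2),
-- where its pair loop never touches the cycles.
def Pre_conflict_graph_adj (cycles : List (List (List Int))) : Prop :=
  ∀ c ∈ cycles, c ≠ []
instance (cycles : List (List (List Int))) : Decidable (Pre_conflict_graph_adj cycles) := by
  unfold Pre_conflict_graph_adj; infer_instance

def pvWitness_conflict_graph_adj : List (List (List Int)) := [[[1, 2]], [[2, 3]], [[5]]]

def Spec_conflict_graph_adj (cycles : List (List (List Int))) (out : List (List Bool)) : Prop := out = conflict_graph_adj_alt cycles
instance (cycles : List (List (List Int))) (out : List (List Bool)) : Decidable (Spec_conflict_graph_adj cycles out) := by unfold Spec_conflict_graph_adj; infer_instance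

-- ===== CLAIM =====
def Claim_equal_conflict_graph_adj : Prop := ∀ (cycles : List (List (List Int))), Dom_conflict_graph_adj cycles → Pre_conflict_graph_adj cycles → Spec_conflict_graph_adj cycles (conflict_graph_adj cycles)

-- ===== LEMMAS AND PROOFS =====

-- cycles[a][0] as both ports read it (total form; indices produced by the loops are in range)
def pvVL (cycles : List (List (List Int))) (a : Nat) : List Int :=
  PySem.List.pyGetD (PySem.List.pyGetD cycles (a : Int) []) 0 []

-- "cycle a and cycle b share a vertex"
def pvShares (cycles : List (List (List Int))) (p q : Nat) : Prop :=
  ∃ v, v ∈ pvVL cycles p ∧ v ∈ pvVL cycles q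

-- matrix shape and entry accessors
def pvShape (n : Nat) (m : List (List Bool)) : Prop := m.length = n ∧ ∀ r ∈ m, r.length = n

def pvE (m : List (List Bool)) (p q : Nat) : Bool :=
  PySem.List.pyGetD (PySem.List.pyGetD m (p : Int) []) (q : Int) false

-- ---------- A side ----------

-- adj[a][b] = adj[b][a] = True, as A performs it
def pvSet2 (adj : List (List Bool)) (a b : Nat) : List (List Bool) :=
  let adj1 := PySem.List.pySetD adj (a : Int) (PySem.List.pySetD (PySem.List.pyGetD adj (a : Int) []) (b : Int) true)
  PySem.List.pySetD adj1 (b : Int) (PySem.List.pySetD (PySem.List.pyGetD adj1 (b : Int) []) (a : Int) true)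

-- one body of A's inner loop, with Nat indices
def pvStep (cycles : List (List (List Int))) (adj : List (List Bool)) (a b : Nat) : List (List Bool) :=
  if PySem.Set.inter (PySem.Set.ofList (pvVL cycles a)) (PySem.Set.ofList (pvVL cycles b)) ≠ [] then
    pvSet2 adj a b
  else adj

def pvInner (cycles : List (List (List Int))) (n a : Nat) (adj : List (List Bool)) : List (List Bool) :=
  (List.range (n - (a+1))).foldl (fun adj k => pvStep cycles adj a (a+1+k)) adj

def pvFoldA (cycles : List (List (List Int))) : List (List Bool) :=
  (List.range cycles.length).foldl (fun adj a => pvInner cycles cycles.length a adj)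
    (List.replicate cycles.length (List.replicate cycles.length false))

theorem pvShares_comm (cycles : List (List (List Int))) (p q : Nat) :
    pvShares cycles p q ↔ pvShares cycles q p := by
  constructor <;> rintro ⟨v, h1, h2⟩ <;> exact ⟨v, h2, h1⟩

theorem pvCond_iff (x y : List Int) :
    PySem.Set.inter (PySem.Set.ofList x) (PySem.Set.ofList y) ≠ [] ↔ ∃ v, v ∈ x ∧ v ∈ y := by
  rw [← List.isEmpty_eq_false_iff, List.isEmpty_eq_false_iff_exists_mem]
  constructor
  · rintro ⟨v, hv⟩
    rw [PySem.Set.mem_inter] at hv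
    exact ⟨v, (PySem.Set.mem_ofList _ _).mp hv.1, (PySem.Set.mem_ofList _ _).mp hv.2⟩
  · rintro ⟨v, h1, h2⟩
    exact ⟨v, (PySem.Set.mem_inter _ _ _).mpr ⟨(PySem.Set.mem_ofList _ _).mpr h1, (PySem.Set.mem_ofList _ _).mpr h2⟩⟩

theorem pvRow {n : Nat} {adj : List (List Bool)} (h : pvShape n adj) {a : Nat} (ha : a < n) :
    (PySem.List.pyGetD adj (a : Int) []).length = n := by
  rw [PySem.List.pyGetD_natCast, List.getD_eq_getElem?_getD,
      List.getElem?_eq_getElem (by rw [h.1]; exact ha : a < adj.length)]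
  exact h.2 _ (List.getElem_mem _)

theorem pvShape_setRow {n : Nat} {adj : List (List Bool)} (h : pvShape n adj)
    {i : Nat} {r : List Bool} (hr : r.length = n) :
    pvShape n (PySem.List.pySetD adj (i : Int) r) := by
  rw [PySem.List.pySetD_natCast]
  refine ⟨by simp [h.1], fun s hs => ?_⟩
  rcases List.mem_or_eq_of_mem_set hs with h' | h'
  · exact h.2 s h'
  · rw [h']; exact hr

theorem pvShape_set2 {n : Nat} {adj : List (List Bool)} (h : pvShape n adj)
    {a b : Nat} (ha : a < n) (hb : b < n) : pvShape n (pvSet2 adj a b) := by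
  unfold pvSet2
  have h1 : pvShape n (PySem.List.pySetD adj (a : Int)
      (PySem.List.pySetD (PySem.List.pyGetD adj (a : Int) []) (b : Int) true)) :=
    pvShape_setRow h (by rw [PySem.List.length_pySetD, pvRow h ha])
  exact pvShape_setRow h1 (by rw [PySem.List.length_pySetD, pvRow h1 hb])

theorem pvE_set2 {n : Nat} {adj : List (List Bool)} (h : pvShape n adj)
    {a b : Nat} (ha : a < n) (hb : b < n) (hab : a ≠ b) (p q : Nat) :
    pvE (pvSet2 adj a b) p q = if (p = a ∧ q = b) ∨ (p = b ∧ q = a) then true else pvE adj p q := by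
  have hA : (PySem.List.pyGetD adj (a : Int) []).length = n := pvRow h ha
  have hB : (PySem.List.pyGetD adj (b : Int) []).length = n := pvRow h hb
  unfold pvE pvSet2
  rw [PySem.List.pyGetD_pySetD_natCast _ b p _ _ (by rw [PySem.List.length_pySetD, h.1]; exact hb)]
  rw [PySem.List.pyGetD_pySetD_natCast _ a b _ _ (by rw [h.1]; exact ha)]
  rw [PySem.List.pyGetD_pySetD_natCast _ a p _ _ (by rw [h.1]; exact ha)]
  rw [if_neg (show ¬ b = a from fun e => hab e.symm)]
  by_cases hpb : p = b
  · rw [if_pos hpb]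
    rw [PySem.List.pyGetD_pySetD_natCast _ a q _ _ (by rw [hB]; exact ha)]
    by_cases hqa : q = a
    · rw [if_pos hqa, if_pos (Or.inr ⟨hpb, hqa⟩)]
    · rw [if_neg hqa,
        if_neg (show ¬ ((p = a ∧ q = b) ∨ (p = b ∧ q = a)) from by
          rintro (⟨h1, h2⟩ | ⟨h1, h2⟩) <;> omega)]
      rw [hpb]
  · rw [if_neg hpb]
    by_cases hpa : p = a
    · rw [if_pos hpa]
      rw [PySem.List.pyGetD_pySetD_natCast _ b q _ _ (by rw [hA]; exact hb)]
      by_cases hqb : q = b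
      · rw [if_pos hqb, if_pos (Or.inl ⟨hpa, hqb⟩)]
      · rw [if_neg hqb,
          if_neg (show ¬ ((p = a ∧ q = b) ∨ (p = b ∧ q = a)) from by
            rintro (⟨h1, h2⟩ | ⟨h1, h2⟩) <;> omega)]
        rw [hpa]
    · rw [if_neg hpa,
        if_neg (show ¬ ((p = a ∧ q = b) ∨ (p = b ∧ q = a)) from by
          rintro (⟨h1, h2⟩ | ⟨h1, h2⟩) <;> omega)]

theorem pvShape_step {n : Nat} {cycles : List (List (List Int))} {adj : List (List Bool)}
    (h : pvShape n adj) {a b : Nat} (ha : a < n) (hb : b < n) :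
    pvShape n (pvStep cycles adj a b) := by
  unfold pvStep; split_ifs with hc
  · exact pvShape_set2 h ha hb
  · exact h

theorem pvE_step {n : Nat} {cycles : List (List (List Int))} {adj : List (List Bool)}
    (h : pvShape n adj) {a b : Nat} (ha : a < n) (hb : b < n) (hab : a ≠ b) (p q : Nat) :
    (pvE (pvStep cycles adj a b) p q = true ↔
      pvE adj p q = true ∨ (((p = a ∧ q = b) ∨ (p = b ∧ q = a)) ∧ pvShares cycles a b)) := by
  unfold pvStep; split_ifs with hc
  · rw [pvE_set2 h ha hb hab p q]
    rw [pvCond_iff] at hc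
    split_ifs with hpq
    · simp [pvShares, hpq, hc]
    · simp [pvShares, hpq]
  · rw [pvCond_iff] at hc
    simp only [pvShares]
    constructor
    · exact Or.inl
    · rintro (h' | ⟨_, v, h1, h2⟩)
      · exact h'
      · exact absurd ⟨v, h1, h2⟩ hc

theorem pvShape_innerA {n : Nat} {cycles : List (List (List Int))} {adj : List (List Bool)}
    (h : pvShape n adj) {a : Nat} (ha : a < n) {m : Nat} (hm : a + 1 + m ≤ n) :
    pvShape n ((List.range m).foldl (fun adj k => pvStep cycles adj a (a+1+k)) adj) := by
  induction m generalizing adj with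
  | zero => simpa using h
  | succ m ih =>
    rw [List.range_succ, List.foldl_append, List.foldl_cons, List.foldl_nil]
    exact pvShape_step (ih h (by omega)) ha (by omega)

theorem pvE_innerA {n : Nat} {cycles : List (List (List Int))} {adj : List (List Bool)}
    (h : pvShape n adj) {a : Nat} (ha : a < n) {m : Nat} (hm : a + 1 + m ≤ n) (p q : Nat) :
    (pvE ((List.range m).foldl (fun adj k => pvStep cycles adj a (a+1+k)) adj) p q = true ↔
      pvE adj p q = true
      ∨ (p = a ∧ a < q ∧ q < a + 1 + m ∧ pvShares cycles a q)
      ∨ (q = a ∧ a < p ∧ p < a + 1 + m ∧ pvShares cycles a p)) := by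
  induction m generalizing adj with
  | zero => simp; omega
  | succ m ih =>
    rw [List.range_succ, List.foldl_append, List.foldl_cons, List.foldl_nil]
    rw [pvE_step (pvShape_innerA h ha (by omega)) ha (by omega) (by omega) p q]
    rw [ih h (by omega)]
    constructor
    · rintro ((h' | h' | h') | ⟨(⟨hp, hq⟩ | ⟨hp, hq⟩), hs⟩)
      · exact Or.inl h'
      · exact Or.inr (Or.inl ⟨h'.1, h'.2.1, by omega, h'.2.2.2⟩)
      · exact Or.inr (Or.inr ⟨h'.1, h'.2.1, by omega, h'.2.2.2⟩)
      · exact Or.inr (Or.inl ⟨hp, by omega, by omega, hq ▸ hs⟩)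
      · exact Or.inr (Or.inr ⟨hq, by omega, by omega, hp ▸ hs⟩)
    · rintro (h' | ⟨hp, h1, h2, hs⟩ | ⟨hq, h1, h2, hs⟩)
      · exact Or.inl (Or.inl h')
      · by_cases hq : q = a + 1 + m
        · exact Or.inr ⟨Or.inl ⟨hp, hq⟩, hq ▸ hs⟩
        · exact Or.inl (Or.inr (Or.inl ⟨hp, h1, by omega, hs⟩))
      · by_cases hp : p = a + 1 + m
        · exact Or.inr ⟨Or.inr ⟨hp, hq⟩, hp ▸ hs⟩
        · exact Or.inl (Or.inr (Or.inr ⟨hq, h1, by omega, hs⟩))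

theorem pvShape_inner' {n : Nat} {cycles : List (List (List Int))} {adj : List (List Bool)}
    (h : pvShape n adj) {a : Nat} (ha : a < n) : pvShape n (pvInner cycles n a adj) := by
  unfold pvInner
  exact pvShape_innerA h ha (by omega)

theorem pvE_inner' {n : Nat} {cycles : List (List (List Int))} {adj : List (List Bool)}
    (h : pvShape n adj) {a : Nat} (ha : a < n) (p q : Nat) :
    (pvE (pvInner cycles n a adj) p q = true ↔
      pvE adj p q = true
      ∨ (p = a ∧ a < q ∧ q < n ∧ pvShares cycles a q)
      ∨ (q = a ∧ a < p ∧ p < n ∧ pvShares cycles a p)) := by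
  unfold pvInner
  have harith : a + 1 + (n - (a+1)) = n := by omega
  rw [pvE_innerA h ha (by omega) p q, harith]

theorem pvShape_outer {n : Nat} {cycles : List (List (List Int))} {adj : List (List Bool)}
    (h : pvShape n adj) {t : Nat} (ht : t ≤ n) :
    pvShape n ((List.range t).foldl (fun adj a => pvInner cycles n a adj) adj) := by
  induction t generalizing adj with
  | zero => simpa using h
  | succ t ih =>
    rw [List.range_succ, List.foldl_append, List.foldl_cons, List.foldl_nil]
    exact pvShape_inner' (ih h (by omega)) (by omega)

theorem pvE_outer {n : Nat} {cycles : List (List (List Int))} {adj : List (List Bool)}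
    (h : pvShape n adj) {t : Nat} (ht : t ≤ n) (p q : Nat) :
    (pvE ((List.range t).foldl (fun adj a => pvInner cycles n a adj) adj) p q = true ↔
      pvE adj p q = true
      ∨ ∃ a, a < t ∧ ((p = a ∧ a < q ∧ q < n ∧ pvShares cycles a q)
                    ∨ (q = a ∧ a < p ∧ p < n ∧ pvShares cycles a p))) := by
  induction t generalizing adj with
  | zero => simp
  | succ t ih =>
    rw [List.range_succ, List.foldl_append, List.foldl_cons, List.foldl_nil]
    have hsh := pvShape_outer (cycles := cycles) h (show t ≤ n by omega)
    refine Iff.trans (pvE_inner' hsh (show t < n by omega) p q) ?_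
    rw [ih h (by omega)]
    constructor
    · rintro ((h' | ⟨a, ha, h'⟩) | ⟨hp, h1, h2, hs⟩ | ⟨hq, h1, h2, hs⟩)
      · exact Or.inl h'
      · exact Or.inr ⟨a, by omega, h'⟩
      · exact Or.inr ⟨t, by omega, Or.inl ⟨hp, h1, h2, hs⟩⟩
      · exact Or.inr ⟨t, by omega, Or.inr ⟨hq, h1, h2, hs⟩⟩
    · rintro (h' | ⟨a, ha, h'⟩)
      · exact Or.inl (Or.inl h')
      · by_cases hat : a = t
        · subst hat
          rcases h' with ⟨hp, h1, h2, hs⟩ | ⟨hq, h1, h2, hs⟩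
          · exact Or.inr (Or.inl ⟨hp, h1, h2, hs⟩)
          · exact Or.inr (Or.inr ⟨hq, h1, h2, hs⟩)
        · exact Or.inl (Or.inr ⟨a, by omega, h'⟩)

theorem pvE_replicate (n p q : Nat) :
    pvE (List.replicate n (List.replicate n false)) p q = false := by
  simp only [pvE, PySem.List.pyGetD_natCast, List.getD_eq_getElem?_getD, List.getElem?_replicate]
  by_cases hp : p < n <;> by_cases hq : q < n <;> simp [hp, hq]

theorem pvShape_replicate (n : Nat) : pvShape n (List.replicate n (List.replicate n false)) := by
  refine ⟨by simp, fun r hr => ?_⟩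
  rw [List.eq_of_mem_replicate hr]; simp

theorem pvE_foldA (cycles : List (List (List Int))) (p q : Nat)
    (hp : p < cycles.length) (hq : q < cycles.length) :
    (pvE (pvFoldA cycles) p q = true ↔ p ≠ q ∧ pvShares cycles p q) := by
  unfold pvFoldA
  rw [pvE_outer (pvShape_replicate _) (le_refl _) p q]
  rw [pvE_replicate]
  simp only [Bool.false_eq_true, false_or]
  constructor
  · rintro ⟨a, ha, ⟨hp', h1, h2, hs⟩ | ⟨hq', h1, h2, hs⟩⟩
    · exact ⟨by omega, hp' ▸ hs⟩
    · exact ⟨by omega, hq' ▸ ((pvShares_comm cycles a p).mp hs)⟩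
  · rintro ⟨hne, hs⟩
    rcases Nat.lt_or_ge p q with hlt | hge
    · exact ⟨p, by omega, Or.inl ⟨rfl, hlt, hq, hs⟩⟩
    · exact ⟨q, by omega, Or.inr ⟨rfl, by omega, hp, (pvShares_comm cycles p q).mp hs⟩⟩

theorem pvShape_foldA (cycles : List (List (List Int))) :
    pvShape cycles.length (pvFoldA cycles) := by
  unfold pvFoldA
  exact pvShape_outer (pvShape_replicate _) (le_refl _)

theorem pvE_getElem {m : List (List Bool)} {p q : Nat} (hp : p < m.length)
    (hq : q < (m[p]).length) : pvE m p q = m[p][q] := by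
  unfold pvE
  have h1 : PySem.List.pyGetD m ((p : Nat) : Int) [] = m[p] := by
    rw [PySem.List.pyGetD_natCast, List.getD_eq_getElem?_getD, List.getElem?_eq_getElem hp]
    rfl
  rw [h1, PySem.List.pyGetD_natCast, List.getD_eq_getElem?_getD, List.getElem?_eq_getElem hq]
  rfl

theorem pvFoldlCongrAll {α β : Type} {l1 l2 : List α} {f g : β → α → β} {i1 i2 : β}
    (hl : l1 = l2) (hi : i1 = i2) (h : ∀ acc x, x ∈ l2 → f acc x = g acc x) :
    l1.foldl f i1 = l2.foldl g i2 := by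
  subst hl; subst hi
  apply PySem.List.foldl_congr_mem
  exact h

theorem pvA_eq (cycles : List (List (List Int))) : conflict_graph_adj cycles = pvFoldA cycles := by
  unfold conflict_graph_adj pvFoldA
  simp only [PySem.List.len_eq]
  rw [PySem.List.pyRange_zero_nat, List.foldl_map]
  apply pvFoldlCongrAll rfl
  · simp [List.map_map, Function.comp_def, List.map_const']
  · intro adj a _
    rw [PySem.List.pyRange_one, List.foldl_map]
    unfold pvInner
    apply pvFoldlCongrAll
    · congr 1
      omega
    · rfl
    · intro adj' k _
      simp only [pvStep, pvSet2, pvVL, Nat.cast_add, Nat.cast_one]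

-- ---------- B side ----------

-- the (vertex, cycle-index) pairs B feeds its index, in B's order
def pvPairs (cycles : List (List (List Int))) : List (Int × Int) :=
  (PySem.List.enumerate cycles).flatMap (fun ic =>
    (PySem.Set.ofList (PySem.List.pyGetD ic.2 0 [])).map (fun v => (v, ic.1)))

def pvIndex (cycles : List (List (List Int))) : PySem.Dict Int (List Int) :=
  (pvPairs cycles).foldl (fun d p => PySem.Dict.modify d p.1 [] (fun g => g ++ [p.2])) PySem.Dict.empty

-- adj[a][b] = True, as B performs it (single entry)
def pvSet1 (adj : List (List Bool)) (a b : Nat) : List (List Bool) :=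
  PySem.List.pySetD adj (a : Int) (PySem.List.pySetD (PySem.List.pyGetD adj (a : Int) []) (b : Int) true)

def pvMarkB (group : List Int) (adj : List (List Bool)) : List (List Bool) :=
  group.foldl (fun adj a =>
    group.foldl (fun adj b =>
      if a ≠ b then
        PySem.List.pySetD adj a (PySem.List.pySetD (PySem.List.pyGetD adj a []) b true)
      else adj) adj) adj

def pvFoldB (cycles : List (List (List Int))) : List (List Bool) :=
  (PySem.Dict.values (pvIndex cycles)).foldl (fun adj g => pvMarkB g adj)
    (List.replicate cycles.length (List.replicate cycles.length false))

-- all members of a group are (casts of) valid cycle indices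
def pvGroupOK (n : Nat) (g : List Int) : Prop := ∀ x ∈ g, ∃ j : Nat, j < n ∧ x = (j : Int)

theorem pvVL_eq (cycles : List (List (List Int))) {k : Nat} (hk : k < cycles.length) :
    pvVL cycles k = PySem.List.pyGetD cycles[k] 0 [] := by
  unfold pvVL
  rw [PySem.List.pyGetD_natCast, List.getD_eq_getElem?_getD, List.getElem?_eq_getElem hk]
  rfl

theorem pvMemPairs (cycles : List (List (List Int))) (v x : Int) :
    ((v, x) ∈ pvPairs cycles ↔ ∃ k : Nat, k < cycles.length ∧ x = (k : Int) ∧ v ∈ pvVL cycles k) := by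
  unfold pvPairs
  rw [List.mem_flatMap]
  constructor
  · rintro ⟨ic, hic, hmem⟩
    obtain ⟨k, hk, rfl⟩ := (PySem.List.mem_enumerate_iff _ _ _).mp hic
    rcases List.mem_map.mp hmem with ⟨w, hw, heq⟩
    obtain ⟨rfl, rfl⟩ : w = v ∧ (0 + (k : Int)) = x := ⟨congrArg Prod.fst heq, congrArg Prod.snd heq⟩
    refine ⟨k, hk, by omega, ?_⟩
    rw [pvVL_eq cycles hk]
    exact (PySem.Set.mem_ofList _ _).mp hw
  · rintro ⟨k, hk, rfl, hv⟩
    refine ⟨((0 : Int) + (k : Int), cycles[k]), ?_, ?_⟩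
    · exact (PySem.List.mem_enumerate_iff _ _ _).mpr ⟨k, hk, rfl⟩
    · refine List.mem_map.mpr ⟨v, ?_, by simp⟩
      rw [pvVL_eq cycles hk] at hv
      exact (PySem.Set.mem_ofList _ _).mpr hv

theorem pvMemIndex (cycles : List (List (List Int))) (v x : Int) :
    (x ∈ (pvIndex cycles).getD v [] ↔ (v, x) ∈ pvPairs cycles) := by
  unfold pvIndex
  rw [PySem.Dict.getD_foldl_modify_append, PySem.Dict.getD_empty, List.nil_append]
  constructor
  · intro hx
    rcases List.mem_map.mp hx with ⟨p, hp, rfl⟩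
    rcases List.mem_filter.mp hp with ⟨hpm, hpv⟩
    have hp1 : p.1 = v := by simpa using hpv
    rwa [show (v, p.2) = p from by rw [← hp1]]
  · intro hvx
    exact List.mem_map.mpr ⟨(v, x), List.mem_filter.mpr ⟨hvx, by simp⟩, rfl⟩

theorem pvKeysIndex (cycles : List (List (List Int))) (v : Int) :
    (v ∈ (pvIndex cycles).keys ↔ v ∈ (pvPairs cycles).map (·.1)) := by
  unfold pvIndex
  rw [PySem.Dict.keys_foldl_modify_key (pvPairs cycles) (fun p => p.1) [] (fun _ p => fun g => g ++ [p.2])]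
  rw [PySem.Set.mem_update, PySem.Dict.keys_empty]
  simp

theorem pvNodupKeysIndex (cycles : List (List (List Int))) : (pvIndex cycles).keys.Nodup := by
  unfold pvIndex
  exact PySem.Dict.nodup_keys_foldl_modify_key (pvPairs cycles) (fun p => p.1) []
    (fun _ p => fun g => g ++ [p.2]) PySem.Dict.empty (by rw [PySem.Dict.keys_empty]; exact List.nodup_nil)

theorem pvMemValues (cycles : List (List (List Int))) (g : List Int) :
    (g ∈ (pvIndex cycles).values ↔ ∃ v, v ∈ (pvIndex cycles).keys ∧ g = (pvIndex cycles).getD v []) := by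
  rw [PySem.Dict.values_eq_map_keys _ (pvNodupKeysIndex cycles) []]
  simp only [List.mem_map]
  constructor
  · rintro ⟨v, hv, rfl⟩; exact ⟨v, hv, rfl⟩
  · rintro ⟨v, hv, rfl⟩; exact ⟨v, hv, rfl⟩

theorem pvGroupsOK (cycles : List (List (List Int))) :
    ∀ g ∈ (pvIndex cycles).values, pvGroupOK cycles.length g := by
  intro g hg x hx
  rcases (pvMemValues cycles g).mp hg with ⟨v, _, rfl⟩
  rcases (pvMemPairs cycles v x).mp ((pvMemIndex cycles v x).mp hx) with ⟨k, hk, rfl, _⟩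
  exact ⟨k, hk, rfl⟩

theorem pvExistsGroup (cycles : List (List (List Int))) (p q : Nat)
    (hp : p < cycles.length) (hq : q < cycles.length) :
    ((∃ g ∈ (pvIndex cycles).values, (p : Int) ∈ g ∧ (q : Int) ∈ g) ↔ pvShares cycles p q) := by
  constructor
  · rintro ⟨g, hg, hpg, hqg⟩
    rcases (pvMemValues cycles g).mp hg with ⟨v, _, rfl⟩
    rcases (pvMemPairs cycles v _).mp ((pvMemIndex cycles v _).mp hpg) with ⟨k1, _, hk1, hv1⟩
    rcases (pvMemPairs cycles v _).mp ((pvMemIndex cycles v _).mp hqg) with ⟨k2, _, hk2, hv2⟩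
    have e1 : k1 = p := by exact_mod_cast hk1.symm
    have e2 : k2 = q := by exact_mod_cast hk2.symm
    exact ⟨v, e1 ▸ hv1, e2 ▸ hv2⟩
  · rintro ⟨v, hv1, hv2⟩
    have hpp : (v, (p : Int)) ∈ pvPairs cycles := (pvMemPairs cycles v _).mpr ⟨p, hp, rfl, hv1⟩
    have hqp : (v, (q : Int)) ∈ pvPairs cycles := (pvMemPairs cycles v _).mpr ⟨q, hq, rfl, hv2⟩
    have hvk : v ∈ (pvIndex cycles).keys :=
      (pvKeysIndex cycles v).mpr (List.mem_map.mpr ⟨(v, (p : Int)), hpp, rfl⟩)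
    refine ⟨(pvIndex cycles).getD v [], (pvMemValues cycles _).mpr ⟨v, hvk, rfl⟩, ?_, ?_⟩
    · exact (pvMemIndex cycles v _).mpr hpp
    · exact (pvMemIndex cycles v _).mpr hqp

theorem pvShape_set1 {n : Nat} {adj : List (List Bool)} (h : pvShape n adj)
    {a : Nat} (ha : a < n) (b : Nat) : pvShape n (pvSet1 adj a b) := by
  unfold pvSet1
  exact pvShape_setRow h (by rw [PySem.List.length_pySetD, pvRow h ha])

theorem pvE_set1 {n : Nat} {adj : List (List Bool)} (h : pvShape n adj)
    {a b : Nat} (ha : a < n) (hb : b < n) (p q : Nat) :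
    pvE (pvSet1 adj a b) p q = if p = a ∧ q = b then true else pvE adj p q := by
  have hA : (PySem.List.pyGetD adj (a : Int) []).length = n := pvRow h ha
  unfold pvE pvSet1
  rw [PySem.List.pyGetD_pySetD_natCast _ a p _ _ (by rw [h.1]; exact ha)]
  by_cases hpa : p = a
  · rw [if_pos hpa]
    rw [PySem.List.pyGetD_pySetD_natCast _ b q _ _ (by rw [hA]; exact hb)]
    by_cases hqb : q = b
    · rw [if_pos hqb, if_pos ⟨hpa, hqb⟩]
    · rw [if_neg hqb, if_neg (fun h' => hqb h'.2), hpa]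
  · rw [if_neg hpa, if_neg (fun h' => hpa h'.1)]

theorem pvShape_markRow {n : Nat} {adj : List (List Bool)} (h : pvShape n adj)
    {a : Nat} (ha : a < n) (g : List Int) :
    pvShape n (g.foldl (fun adj b =>
      if (a : Int) ≠ b then
        PySem.List.pySetD adj (a : Int) (PySem.List.pySetD (PySem.List.pyGetD adj (a : Int) []) b true)
      else adj) adj) := by
  induction g generalizing adj with
  | nil => simpa using h
  | cons x t ih =>
    rw [List.foldl_cons]
    apply ih
    split_ifs with hx
    · exact pvShape_setRow h (by rw [PySem.List.length_pySetD, pvRow h ha])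
    · exact h

theorem pvE_markRow {n : Nat} {adj : List (List Bool)} (h : pvShape n adj)
    {a : Nat} (ha : a < n) {g : List Int} (hg : pvGroupOK n g) (p q : Nat) :
    (pvE (g.foldl (fun adj b =>
        if (a : Int) ≠ b then
          PySem.List.pySetD adj (a : Int) (PySem.List.pySetD (PySem.List.pyGetD adj (a : Int) []) b true)
        else adj) adj) p q = true ↔
      pvE adj p q = true ∨ (p = a ∧ (q : Int) ∈ g ∧ q ≠ a)) := by
  induction g generalizing adj with
  | nil => simp
  | cons x t ih =>
    obtain ⟨jx, hjx, rfl⟩ := hg x List.mem_cons_self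
    rw [List.foldl_cons]
    have ht : pvGroupOK n t := fun y hy => hg y (List.mem_cons_of_mem _ hy)
    by_cases hax : a = jx
    · subst hax
      rw [if_neg (by simp)]
      rw [ih h ht]
      constructor
      · rintro (h' | ⟨hp, hq, hne⟩)
        · exact Or.inl h'
        · exact Or.inr ⟨hp, List.mem_cons_of_mem _ hq, hne⟩
      · rintro (h' | ⟨hp, hq, hne⟩)
        · exact Or.inl h'
        · rcases List.mem_cons.mp hq with h'' | h''
          · exact absurd (by exact_mod_cast h'') hne
          · exact Or.inr ⟨hp, h'', hne⟩
    · rw [if_pos (show ((a : Nat) : Int) ≠ ((jx : Nat) : Int) by exact_mod_cast hax)]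
      have hrw : PySem.List.pySetD adj (a : Int)
          (PySem.List.pySetD (PySem.List.pyGetD adj (a : Int) []) ((jx : Nat) : Int) true) = pvSet1 adj a jx := rfl
      rw [hrw, ih (pvShape_set1 h ha jx) ht, pvE_set1 h ha hjx]
      constructor
      · rintro (h' | ⟨hp, hq, hne⟩)
        · split_ifs at h' with hc
          · exact Or.inr ⟨hc.1, by rw [hc.2]; exact List.mem_cons_self, by omega⟩
          · exact Or.inl h'
        · exact Or.inr ⟨hp, List.mem_cons_of_mem _ hq, hne⟩
      · rintro (h' | ⟨hp, hq, hne⟩)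
        · refine Or.inl ?_
          split_ifs with hc
          · rfl
          · exact h'
        · rcases List.mem_cons.mp hq with h'' | h''
          · have hq' : q = jx := by exact_mod_cast h''
            exact Or.inl (by rw [if_pos ⟨hp, hq'⟩])
          · exact Or.inr ⟨hp, h'', hne⟩

theorem pvShape_markOuter {n : Nat} {adj : List (List Bool)} (h : pvShape n adj)
    {l : List Int} (hl : pvGroupOK n l) (g : List Int) :
    pvShape n (l.foldl (fun adj a =>
      g.foldl (fun adj b =>
        if a ≠ b then
          PySem.List.pySetD adj a (PySem.List.pySetD (PySem.List.pyGetD adj a []) b true)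
        else adj) adj) adj) := by
  induction l generalizing adj with
  | nil => simpa using h
  | cons x t ih =>
    obtain ⟨jx, hjx, rfl⟩ := hl x List.mem_cons_self
    rw [List.foldl_cons]
    exact ih (pvShape_markRow h hjx g) (fun y hy => hl y (List.mem_cons_of_mem _ hy))

theorem pvE_markOuter {n : Nat} {adj : List (List Bool)} (h : pvShape n adj)
    {l g : List Int} (hl : pvGroupOK n l) (hg : pvGroupOK n g) (p q : Nat) :
    (pvE (l.foldl (fun adj a =>
        g.foldl (fun adj b =>
          if a ≠ b then
            PySem.List.pySetD adj a (PySem.List.pySetD (PySem.List.pyGetD adj a []) b true)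
          else adj) adj) adj) p q = true ↔
      pvE adj p q = true ∨ ((p : Int) ∈ l ∧ (q : Int) ∈ g ∧ p ≠ q)) := by
  induction l generalizing adj with
  | nil => simp
  | cons x t ih =>
    obtain ⟨jx, hjx, rfl⟩ := hl x List.mem_cons_self
    rw [List.foldl_cons]
    have ht : pvGroupOK n t := fun y hy => hl y (List.mem_cons_of_mem _ hy)
    rw [ih (pvShape_markRow h hjx g) ht, pvE_markRow h hjx hg]
    constructor
    · rintro ((h' | ⟨hp, hq, hne⟩) | ⟨hp, hq, hne⟩)
      · exact Or.inl h'
      · exact Or.inr ⟨by rw [hp]; exact List.mem_cons_self, hq, by omega⟩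
      · exact Or.inr ⟨List.mem_cons_of_mem _ hp, hq, hne⟩
    · rintro (h' | ⟨hp, hq, hne⟩)
      · exact Or.inl (Or.inl h')
      · rcases List.mem_cons.mp hp with h'' | h''
        · have hpj : p = jx := by exact_mod_cast h''
          exact Or.inl (Or.inr ⟨hpj, hq, by omega⟩)
        · exact Or.inr ⟨h'', hq, hne⟩

theorem pvShape_markB {n : Nat} {adj : List (List Bool)} (h : pvShape n adj)
    {g : List Int} (hg : pvGroupOK n g) : pvShape n (pvMarkB g adj) :=
  pvShape_markOuter h hg g

theorem pvE_markB {n : Nat} {adj : List (List Bool)} (h : pvShape n adj)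
    {g : List Int} (hg : pvGroupOK n g) (p q : Nat) :
    (pvE (pvMarkB g adj) p q = true ↔
      pvE adj p q = true ∨ ((p : Int) ∈ g ∧ (q : Int) ∈ g ∧ p ≠ q)) :=
  pvE_markOuter h hg hg p q

theorem pvShape_groups {n : Nat} {adj : List (List Bool)} (h : pvShape n adj)
    {gs : List (List Int)} (hgs : ∀ g ∈ gs, pvGroupOK n g) :
    pvShape n (gs.foldl (fun adj g => pvMarkB g adj) adj) := by
  induction gs generalizing adj with
  | nil => simpa using h
  | cons x t ih =>
    rw [List.foldl_cons]
    exact ih (pvShape_markB h (hgs x List.mem_cons_self))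
      (fun g hg => hgs g (List.mem_cons_of_mem _ hg))

theorem pvE_groups {n : Nat} {adj : List (List Bool)} (h : pvShape n adj)
    {gs : List (List Int)} (hgs : ∀ g ∈ gs, pvGroupOK n g) (p q : Nat) :
    (pvE (gs.foldl (fun adj g => pvMarkB g adj) adj) p q = true ↔
      pvE adj p q = true ∨ ∃ g ∈ gs, (p : Int) ∈ g ∧ (q : Int) ∈ g ∧ p ≠ q) := by
  induction gs generalizing adj with
  | nil => simp
  | cons x t ih =>
    rw [List.foldl_cons]
    have hx : pvGroupOK n x := hgs x List.mem_cons_self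
    have ht : ∀ g ∈ t, pvGroupOK n g := fun g hg => hgs g (List.mem_cons_of_mem _ hg)
    rw [ih (pvShape_markB h hx) ht, pvE_markB h hx]
    constructor
    · rintro ((h' | ⟨hp, hq, hne⟩) | ⟨g, hg, hp, hq, hne⟩)
      · exact Or.inl h'
      · exact Or.inr ⟨x, List.mem_cons_self, hp, hq, hne⟩
      · exact Or.inr ⟨g, List.mem_cons_of_mem _ hg, hp, hq, hne⟩
    · rintro (h' | ⟨g, hg, hp, hq, hne⟩)
      · exact Or.inl (Or.inl h')
      · rcases List.mem_cons.mp hg with rfl | h''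
        · exact Or.inl (Or.inr ⟨hp, hq, hne⟩)
        · exact Or.inr ⟨g, h'', hp, hq, hne⟩

theorem pvE_foldB (cycles : List (List (List Int))) (p q : Nat)
    (hp : p < cycles.length) (hq : q < cycles.length) :
    (pvE (pvFoldB cycles) p q = true ↔ p ≠ q ∧ pvShares cycles p q) := by
  unfold pvFoldB
  rw [pvE_groups (pvShape_replicate _) (pvGroupsOK cycles) p q, pvE_replicate]
  simp only [Bool.false_eq_true, false_or]
  constructor
  · rintro ⟨g, hg, hpg, hqg, hne⟩
    exact ⟨hne, (pvExistsGroup cycles p q hp hq).mp ⟨g, hg, hpg, hqg⟩⟩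
  · rintro ⟨hne, hs⟩
    rcases (pvExistsGroup cycles p q hp hq).mpr hs with ⟨g, hg, hpg, hqg⟩
    exact ⟨g, hg, hpg, hqg, hne⟩

theorem pvShape_foldB (cycles : List (List (List Int))) :
    pvShape cycles.length (pvFoldB cycles) := by
  unfold pvFoldB
  exact pvShape_groups (pvShape_replicate _) (pvGroupsOK cycles)

theorem pvB_eq (cycles : List (List (List Int))) : conflict_graph_adj_alt cycles = pvFoldB cycles := by
  unfold conflict_graph_adj_alt pvFoldB
  simp only [PySem.List.len_eq]
  have hidx : (PySem.List.enumerate cycles).foldl (fun d ic =>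
      (PySem.Set.ofList (PySem.List.pyGetD ic.2 0 [])).foldl (fun d v =>
        PySem.Dict.modify d v [] (fun g => g ++ [ic.1])) d) PySem.Dict.empty = pvIndex cycles := by
    unfold pvIndex pvPairs
    rw [List.foldl_flatMap]
    apply PySem.List.foldl_congr_mem
    intro d ic _
    rw [List.foldl_map]
  apply pvFoldlCongrAll
  · rw [hidx]
  · rw [PySem.List.pyRange_zero_nat]
    simp [List.map_map, Function.comp_def, List.map_const']
  · intro adj g _
    rfl

-- ===== VERDICT =====
theorem conflict_graph_adj_spec : Claim_equal_conflict_graph_adj := by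
  intro cycles _ _
  unfold Spec_conflict_graph_adj
  rw [pvA_eq, pvB_eq]
  have hshA := pvShape_foldA cycles
  have hshB := pvShape_foldB cycles
  apply List.ext_getElem
  · rw [hshA.1, hshB.1]
  · intro p hp hp'
    have hpn : p < cycles.length := by rw [← hshA.1]; exact hp
    apply List.ext_getElem
    · rw [hshA.2 _ (List.getElem_mem hp), hshB.2 _ (List.getElem_mem hp')]
    · intro q hq hq'
      have hqn : q < cycles.length := by
        rw [hshA.2 _ (List.getElem_mem hp)] at hq; exact hq
      rw [← pvE_getElem hp hq, ← pvE_getElem hp' hq']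
      exact Bool.eq_iff_iff.mpr ((pvE_foldA cycles p q hpn hqn).trans (pvE_foldB cycles p q hpn hqn).symm)
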